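-- pv_equiv track=rewrite | github.com/katzung/Entity-Alignment-Data-Preparation | AlignTypes.py | low_class
-- ===== SOURCE A (Python) =====
-- def subClassOf(subClasses, class_1, class_2):
--     answer = False
--     while True:
--         if class_1 == class_2:
--             answer = True
--             break
--         else:
--             if class_1 not in subClasses:
--                 break
--             class_1 = subClasses[class_1]
--     return answer
--
-- def low_class(subClasses, classes):
--     lc = None
--     if len(classes) == 1:
--         lc = classes.pop()
--     for elem in classes:
--         answers = set()
--         other_classes = set.copy(classes)
--         other_classes.remove(elem)
--         for other_elem in other_classes:
--             answer = subClassOf(subClasses, elem, other_elem)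
--             answers.add(answer)
--
--         if True in answers and len(answers) == 1:
--             lc = elem
--             break
--
--     return lc
-- ===== SOURCE B (Python) =====
-- def low_class(subClasses, classes):
--     # Different algorithm: take the class with the longest ancestor chain (one chain
--     # walk per class) and verify once that its chain covers all classes, instead of
--     # testing every class against every other.  Note: like A, pops the single
--     # element of `classes` when len(classes) == 1.
--     if len(classes) == 1:
--         return classes.pop()
--
--     def chain(c):
--         out = [c]
--         while c in subClasses:
--             c = subClasses[c]
--             out.append(c)
--         return out
--
--     best, best_chain = None, []
--     for c in classes:
--         ch = chain(c)
--         if best is None or len(best_chain) < len(ch):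
--             best, best_chain = c, ch
--
--     if best is not None and classes <= set(best_chain):
--         return best
--     return None
-- ===== Notes on version B (the rewrite author's own statement) =====
-- stated objective: faster
-- what changed: B walks each class's ancestor chain once, keeps only the class with the longest chain, and does a single subset check of that chain against all classes, instead of A's nested loop that re-walks chains for every ordered pair via subClassOf; correct because under acyclic chains a class covering all others is exactly the strict-maximum-depth class whose chain covers them.
-- outside the precondition, e.g. on low_class({'a': 'a'}, {'a'}): A returns 'a', B returns 'a'
import Mathlib
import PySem

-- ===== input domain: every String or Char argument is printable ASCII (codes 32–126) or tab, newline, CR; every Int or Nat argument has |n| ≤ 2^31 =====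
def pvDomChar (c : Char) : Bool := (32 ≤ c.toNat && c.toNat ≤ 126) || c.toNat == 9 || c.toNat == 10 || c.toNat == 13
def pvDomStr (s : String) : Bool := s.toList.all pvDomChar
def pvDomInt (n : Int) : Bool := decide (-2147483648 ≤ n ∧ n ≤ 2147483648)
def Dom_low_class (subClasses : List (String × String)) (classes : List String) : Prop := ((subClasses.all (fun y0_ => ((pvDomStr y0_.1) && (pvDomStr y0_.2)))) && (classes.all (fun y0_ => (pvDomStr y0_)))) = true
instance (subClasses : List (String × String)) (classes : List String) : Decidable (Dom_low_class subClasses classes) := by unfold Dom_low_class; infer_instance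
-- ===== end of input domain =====

-- B replaces A's per-ordered-pair chain walks by one chain walk per class, keeping only the
-- longest chain and doing a single subset check (faster); the equivalence is about the
-- RETURN value; both versions pop the single element from `classes` when it has one element.
-- `classes` is a Python set (its List holds the distinct elements); `subClasses` is a dict.

-- ===== PORT A =====
-- while True chain walk of subClassOf, with fuel: a chain that terminates visits pairwise
-- distinct keys of the dict, so `subClasses.length + 1` steps always suffice (Pre_ excludes
-- the diverging, i.e. cyclic, chains).
def subClassOfA (d : PySem.Dict String String) : Nat → String → String → Bool
  | 0, _, _ => false            -- fuel exhausted: unreachable under Pre_low_class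
  | n+1, class_1, class_2 =>
    if class_1 == class_2 then true
    else
      match d.get? class_1 with
      | none => false
      | some p => subClassOfA d n p class_2

-- the `for elem in classes:` loop of A (result is iteration-order independent under Pre_)
def lowLoopA (d : PySem.Dict String String) (fuel : Nat) (classes : PySem.Set String) :
    List String → Option String
  | [] => none
  | elem :: rest =>
    let other_classes := PySem.Set.discard classes elem   -- set.copy + remove (elem is a member)
    let answers := other_classes.foldl
      (fun s other_elem => PySem.Set.add s (subClassOfA d fuel elem other_elem)) PySem.Set.empty
    if PySem.Set.contains answers true && PySem.Set.len answers == 1 then some elem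
    else lowLoopA d fuel classes rest

def low_class (subClasses : List (String × String)) (classes : List String) : Option String :=
  let d := PySem.Dict.ofList subClasses
  if classes.length == 1 then
    classes.head?                 -- lc = classes.pop(); the for-loop then runs over the emptied set
  else
    lowLoopA d (subClasses.length + 1) classes classes

-- ===== PORT B =====
-- the `while c in subClasses:` walk of B's chain(c), appending each parent; fuel counts
-- successful lookups, so `subClasses.length` suffices on terminating chains.
def chainWalkB (d : PySem.Dict String String) : Nat → String → List String → List String
  | 0, _, out => out            -- fuel exhausted: unreachable under Pre_low_class
  | n+1, c, out =>
    match d.get? c with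
    | none => out
    | some p => chainWalkB d n p (out ++ [p])

-- B's for-loop: running best class together with its chain (first strict improvement wins)
def pickBest (d : PySem.Dict String String) (fuel : Nat) :
    List String → Option String × List String → Option String × List String
  | [], acc => acc
  | c :: rest, (best, best_chain) =>
    let ch := chainWalkB d fuel c [c]
    if best.isNone || decide (best_chain.length < ch.length) then
      pickBest d fuel rest (some c, ch)
    else
      pickBest d fuel rest (best, best_chain)

def low_class_alt (subClasses : List (String × String)) (classes : List String) : Option String :=
  let d := PySem.Dict.ofList subClasses
  if classes.length == 1 then
    classes.head?
  else
    match pickBest d subClasses.length classes (none, []) with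
    | (none, _) => none
    | (some best, best_chain) =>
      if classes.all (fun o => PySem.Set.contains (PySem.Set.ofList best_chain) o) then some best
      else none

-- ===== PRECONDITION & SPEC =====
-- Pre_ excludes (a) `classes` lists with duplicates, which do not represent a Python set
-- (calling A on such a list raises TypeError at set.copy), and (b) inputs where the parent
-- chain of some class is cyclic: there A's while-True loop (and B's while loop) diverges,
-- except in corners no caller would rely on (a single class, where the chain is never walked
-- and both programs return it; all classes on one cycle, where A's winner depends on set
-- hash order).  "the chain from c terminates" is stated as: the (|subClasses|+1)-fold
-- iterated parent lookup of c is undefined (a terminating chain visits pairwise distinct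
-- keys, so |subClasses|+1 lookups always suffice; `none` is absorbing).
def Pre_low_class (subClasses : List (String × String)) (classes : List String) : Prop :=
  classes.Nodup ∧
  ∀ c ∈ classes,
    (fun o : Option String => o.bind (PySem.Dict.ofList subClasses).get?)^[subClasses.length + 1]
      (some c) = none
instance (subClasses : List (String × String)) (classes : List String) :
    Decidable (Pre_low_class subClasses classes) := by unfold Pre_low_class; infer_instance

def pvWitness_low_class : (List (String × String)) × List String :=
  ([("b", "a"), ("c", "b")], ["a", "b", "c"])

def Spec_low_class (subClasses : List (String × String)) (classes : List String) (out : Option String) : Prop := out = low_class_alt subClasses classes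
instance (subClasses : List (String × String)) (classes : List String) (out : Option String) : Decidable (Spec_low_class subClasses classes out) := by unfold Spec_low_class; infer_instance

-- ===== CLAIM (what is proved, stated in full; the proofs are below) =====
def Claim_equal_low_class : Prop := ∀ (subClasses : List (String × String)) (classes : List String), Dom_low_class subClasses classes → Pre_low_class subClasses classes → Spec_low_class subClasses classes (low_class subClasses classes)

-- ===== LEMMAS AND PROOFS =====

-- proof-side: the (truncated) list of proper ancestors of c, and termination of the chain
def chainDrop (d : PySem.Dict String String) : Nat → String → List String
  | 0, _ => []
  | n+1, c =>
    match d.get? c with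
    | none => []
    | some p => p :: chainDrop d n p

def TermC (d : PySem.Dict String String) (m : Nat) (c : String) : Prop :=
  (fun o : Option String => o.bind d.get?)^[m] (some c) = none

theorem chainDrop_succ (d : PySem.Dict String String) (n : Nat) (c : String) :
    chainDrop d (n+1) c = match d.get? c with
      | none => []
      | some p => p :: chainDrop d n p := rfl

theorem termC_none (d : PySem.Dict String String) (m : Nat) :
    (fun o : Option String => o.bind d.get?)^[m] none = none := by
  induction m with
  | zero => rfl
  | succ n ih => rw [Function.iterate_succ_apply]; exact ih

theorem termC_succ (d : PySem.Dict String String) (m : Nat) (c : String) :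
    TermC d (m+1) c ↔
      (d.get? c = none ∨ ∃ p, d.get? c = some p ∧ TermC d m p) := by
  unfold TermC
  rw [Function.iterate_succ_apply]
  have hstep : (some c).bind d.get? = d.get? c := rfl
  rw [hstep]
  cases h : d.get? c with
  | none => rw [termC_none]; simp
  | some p => simp

theorem termC_mono (d : PySem.Dict String String) (m : Nat) (c : String)
    (h : TermC d m c) : TermC d (m+1) c := by
  unfold TermC at *
  rw [Function.iterate_succ_apply', h]
  rfl

-- with m successful lookups allowed, a chain terminating within m+1 iterate steps is complete
theorem chainDrop_stable (d : PySem.Dict String String) (m : Nat) :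
    ∀ c, TermC d (m+1) c → ∀ k, m ≤ k → chainDrop d k c = chainDrop d m c := by
  induction m with
  | zero =>
    intro c hterm k _
    rcases (termC_succ d 0 c).mp hterm with h | ⟨p, _, hp⟩
    · cases k with
      | zero => rfl
      | succ k' => simp [chainDrop, h]
    · cases hp
  | succ n ih =>
    intro c hterm k hk
    rcases (termC_succ d (n+1) c).mp hterm with h | ⟨p, hp, hterm'⟩
    · cases k with
      | zero => exact absurd hk (by omega)
      | succ k' => simp [chainDrop, h]
    · match k, hk with
      | k'+1, hk =>
        simp only [chainDrop, hp]
        rw [ih p hterm' k' (Nat.succ_le_succ_iff.mp hk)]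

-- suffix lemma: an ancestor's chain is a suffix of the chain it occurs in
theorem chainDrop_suffix (d : PySem.Dict String String) (m : Nat) :
    ∀ c, TermC d (m+1) c → ∀ o ∈ chainDrop d m c,
      ((o :: chainDrop d m o) <:+ chainDrop d m c) ∧ TermC d (m+1) o := by
  induction m with
  | zero => intro c _ o ho; cases ho
  | succ n ih =>
    intro c hterm o ho
    rcases (termC_succ d (n+1) c).mp hterm with h | ⟨p, hp, hterm'⟩
    · simp [chainDrop, h] at ho
    · simp only [chainDrop, hp, List.mem_cons] at ho
      have hstab : chainDrop d (n+1) p = chainDrop d n p :=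
        chainDrop_stable d n p hterm' (n+1) (Nat.le_succ n)
      rcases ho with rfl | ho
      · refine ⟨?_, termC_mono d (n+1) o hterm'⟩
        rw [hstab, chainDrop_succ, hp]
      · obtain ⟨hsuf, hoterm⟩ := ih p hterm' o ho
        have hostab : chainDrop d (n+1) o = chainDrop d n o :=
          chainDrop_stable d n o hoterm (n+1) (Nat.le_succ n)
        refine ⟨?_, termC_mono d (n+1) o hoterm⟩
        rw [hostab, chainDrop_succ, hp]
        exact hsuf.trans (List.suffix_cons p (chainDrop d n p))

theorem chainDrop_depth (d : PySem.Dict String String) (m : Nat) (c o : String)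
    (hterm : TermC d (m+1) c) (ho : o ∈ chainDrop d m c) :
    (chainDrop d m o).length < (chainDrop d m c).length := by
  have h := ((chainDrop_suffix d m c hterm o ho).1).length_le
  simpa using Nat.lt_of_lt_of_le (Nat.lt_succ_self _) h

-- bridges from the ports to chainDrop
theorem subClassOfA_succ (d : PySem.Dict String String) (n : Nat) (c1 c2 : String) :
    subClassOfA d (n+1) c1 c2 = if c1 == c2 then true else
      match d.get? c1 with
      | none => false
      | some p => subClassOfA d n p c2 := rfl

theorem subClassOfA_eq (d : PySem.Dict String String) (n : Nat) (c o : String) :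
    subClassOfA d (n+1) c o = true ↔ (o = c ∨ o ∈ chainDrop d n c) := by
  induction n generalizing c with
  | zero =>
    rw [subClassOfA_succ]
    cases h : d.get? c with
    | none =>
      simp only [chainDrop, beq_iff_eq]
      by_cases hc : c = o
      · simp [hc]
      · rw [if_neg hc]; simp; exact fun h' => hc h'.symm
    | some p =>
      simp only [chainDrop, beq_iff_eq, subClassOfA]
      by_cases hc : c = o
      · simp [hc]
      · rw [if_neg hc]; simp; exact fun h' => hc h'.symm
  | succ n ih =>
    rw [subClassOfA_succ]
    cases h : d.get? c with
    | none =>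
      simp only [chainDrop, h, beq_iff_eq]
      by_cases hc : c = o
      · simp [hc]
      · rw [if_neg hc]; simp; exact fun h' => hc h'.symm
    | some p =>
      simp only [chainDrop, h, List.mem_cons, beq_iff_eq]
      by_cases hc : c = o
      · simp [hc]
      · rw [if_neg hc, ih p]
        constructor
        · rintro (h' | h')
          · exact Or.inr (Or.inl h')
          · exact Or.inr (Or.inr h')
        · rintro (h' | h' | h')
          · exact absurd h'.symm hc
          · exact Or.inl h'
          · exact Or.inr h'

theorem chainWalkB_eq (d : PySem.Dict String String) (n : Nat) :
    ∀ (c : String) (out : List String),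
      chainWalkB d n c out = out ++ chainDrop d n c := by
  induction n with
  | zero => intro c out; simp [chainWalkB, chainDrop]
  | succ n ih =>
    intro c out
    simp only [chainWalkB, chainDrop]
    cases h : d.get? c with
    | none => simp
    | some p =>
      have hih : chainWalkB d n p (out ++ [p]) = (out ++ [p]) ++ chainDrop d n p := ih p (out ++ [p])
      simp [hih]

-- the True-in-answers-and-singleton test over a nodup Bool list
theorem bool_singleton_true (l : List Bool) (hnd : l.Nodup) :
    ((true ∈ l ∧ l.length = 1) ↔ (l ≠ [] ∧ ∀ b ∈ l, b = true)) := by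
  match l, hnd with
  | [], _ => simp
  | [b], _ => cases b <;> simp
  | b :: b' :: rest, hnd =>
    constructor
    · rintro ⟨-, h⟩; simp at h
    · rintro ⟨-, h⟩
      have hb := h b (by simp)
      have hb' := h b' (by simp)
      subst hb hb'
      simp at hnd

-- A's per-element test, characterised: "elem's proper-ancestor chain covers all other classes"
theorem condA_iff (d : PySem.Dict String String) (m : Nat) (elem : String)
    (classes : List String) (hne : ∃ x ∈ classes, x ≠ elem) :
    ((PySem.Set.contains
        (List.foldl (fun s other_elem => PySem.Set.add s (subClassOfA d (m+1) elem other_elem))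
          PySem.Set.empty (PySem.Set.discard classes elem)) true &&
      PySem.Set.len
        (List.foldl (fun s other_elem => PySem.Set.add s (subClassOfA d (m+1) elem other_elem))
          PySem.Set.empty (PySem.Set.discard classes elem)) == 1) = true) ↔
    (∀ o ∈ classes, o = elem ∨ o ∈ chainDrop d m elem) := by
  rw [← PySem.Set.update_map_eq_foldl_add (PySem.Set.discard classes elem)
        (fun other_elem => subClassOfA d (m+1) elem other_elem) PySem.Set.empty,
      PySem.Set.update_empty]
  rw [Bool.and_eq_true, PySem.Set.contains_iff, beq_iff_eq]
  have hlen : PySem.Set.len (PySem.Set.ofList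
      ((PySem.Set.discard classes elem).map (fun other_elem => subClassOfA d (m+1) elem other_elem)))
      = (1 : Int) ↔ (PySem.Set.ofList
      ((PySem.Set.discard classes elem).map (fun other_elem => subClassOfA d (m+1) elem other_elem))).length = 1 := by
    simp [PySem.Set.len]
  rw [hlen, bool_singleton_true _ (PySem.Set.nodup_ofList _)]
  constructor
  · rintro ⟨-, hall⟩ o ho
    by_cases hoe : o = elem
    · exact Or.inl hoe
    · have hmem : subClassOfA d (m+1) elem o ∈ PySem.Set.ofList
          ((PySem.Set.discard classes elem).map (fun other_elem => subClassOfA d (m+1) elem other_elem)) :=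
        (PySem.Set.mem_ofList _ _).mpr
          (List.mem_map.mpr ⟨o, (PySem.Set.mem_discard _ _ _).mpr ⟨ho, hoe⟩, rfl⟩)
      exact (subClassOfA_eq d m elem o).mp (hall _ hmem)
  · intro hall
    constructor
    · obtain ⟨x, hx, hxe⟩ := hne
      have hmem : subClassOfA d (m+1) elem x ∈ PySem.Set.ofList
          ((PySem.Set.discard classes elem).map (fun other_elem => subClassOfA d (m+1) elem other_elem)) :=
        (PySem.Set.mem_ofList _ _).mpr
          (List.mem_map.mpr ⟨x, (PySem.Set.mem_discard _ _ _).mpr ⟨hx, hxe⟩, rfl⟩)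
      intro hnil
      rw [hnil] at hmem
      cases hmem
    · intro b hb
      obtain ⟨o, ho, rfl⟩ := List.mem_map.mp ((PySem.Set.mem_ofList _ _).mp hb)
      obtain ⟨ho1, _⟩ := (PySem.Set.mem_discard _ _ _).mp ho
      exact (subClassOfA_eq d m elem o).mpr (hall o ho1)

-- B's subset test, characterised the same way
theorem condB_iff (d : PySem.Dict String String) (m : Nat) (b : String) (classes : List String) :
    ((classes.all (fun o =>
        PySem.Set.contains (PySem.Set.ofList (chainWalkB d m b [b])) o)) = true) ↔
    (∀ o ∈ classes, o = b ∨ o ∈ chainDrop d m b) := by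
  rw [List.all_eq_true]
  refine forall₂_congr (fun o ho => ?_)
  rw [PySem.Set.contains_iff, PySem.Set.mem_ofList, chainWalkB_eq]
  simp

-- proof-side running argmax of B's loop (first strict improvement wins)
def argmH (d : PySem.Dict String String) (m : Nat) (b0 : String) : List String → String
  | [] => b0
  | c :: cs =>
    if (chainWalkB d m b0 [b0]).length < (chainWalkB d m c [c]).length then argmH d m c cs
    else argmH d m b0 cs

theorem pickBest_run (d : PySem.Dict String String) (m : Nat) :
    ∀ (cs : List String) (b0 : String),
      pickBest d m cs (some b0, chainWalkB d m b0 [b0]) =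
        (some (argmH d m b0 cs), chainWalkB d m (argmH d m b0 cs) [argmH d m b0 cs]) := by
  intro cs
  induction cs with
  | nil => intro b0; rfl
  | cons c cs ih =>
    intro b0
    simp only [pickBest, argmH, Option.isNone_some, Bool.false_or, decide_eq_true_eq]
    split_ifs with h
    · exact ih c
    · exact ih b0

theorem argmH_mem (d : PySem.Dict String String) (m : Nat) :
    ∀ (cs : List String) (b0 : String), argmH d m b0 cs ∈ b0 :: cs := by
  intro cs
  induction cs with
  | nil => intro b0; simp [argmH]
  | cons c cs ih =>
    intro b0
    simp only [argmH]
    split_ifs with h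
    · have := ih c; simp at this ⊢; tauto
    · have := ih b0; simp at this ⊢; tauto

theorem argmH_max (d : PySem.Dict String String) (m : Nat) (w : String) :
    ∀ (cs : List String) (b0 : String),
      w ∈ b0 :: cs →
      (∀ x ∈ b0 :: cs, x ≠ w →
        (chainWalkB d m x [x]).length < (chainWalkB d m w [w]).length) →
      argmH d m b0 cs = w := by
  intro cs
  induction cs with
  | nil =>
    intro b0 hw _
    simp at hw
    simp [argmH, hw]
  | cons c cs ih =>
    intro b0 hw hdom
    simp only [List.mem_cons] at hw
    simp only [argmH]
    by_cases h : (chainWalkB d m b0 [b0]).length < (chainWalkB d m c [c]).length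
    · rw [if_pos h]
      refine ih c ?_ (fun x hx hxw => hdom x (List.mem_cons_of_mem b0 hx) hxw)
      -- w ∈ c :: cs : w ≠ b0, else dominance on c contradicts h
      by_cases hwc : w = c
      · simp [hwc]
      · have hwb : w ≠ b0 := by
          rintro rfl
          have hc := hdom c (by simp) (fun hcw => hwc hcw.symm)
          omega
        simp only [List.mem_cons]
        tauto
    · rw [if_neg h]
      refine ih b0 ?_ (fun x hx hxw => hdom x (by
        simp only [List.mem_cons] at hx ⊢; tauto) hxw)
      -- w ∈ b0 :: cs : w ≠ c, else dominance on b0 contradicts ¬h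
      by_cases hwc : w = c
      · subst hwc
        by_cases hwb : w = b0
        · simp [hwb]
        · have hb := hdom b0 (by simp) (fun hb => hwb hb.symm)
          omega
      · simp only [List.mem_cons]
        tauto

-- A's loop, characterised when a unique covering class exists / when none exists
theorem lowLoopA_none (d : PySem.Dict String String) (m : Nat) (classes : List String)
    (hnocover : ∀ e ∈ classes, ¬ (∀ o ∈ classes, o = e ∨ o ∈ chainDrop d m e))
    (hbig : ∀ e ∈ classes, ∃ x ∈ classes, x ≠ e) :
    ∀ lst, (∀ x ∈ lst, x ∈ classes) → lowLoopA d (m+1) classes lst = none := by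
  intro lst
  induction lst with
  | nil => intro _; rfl
  | cons e rest ih =>
    intro hsub
    have he : e ∈ classes := hsub e (by simp)
    rw [lowLoopA]
    rw [if_neg ?_]
    · exact ih (fun x hx => hsub x (List.mem_cons_of_mem _ hx))
    · intro hcond
      exact hnocover e he ((condA_iff d m e classes (hbig e he)).mp hcond)

theorem lowLoopA_some (d : PySem.Dict String String) (m : Nat) (classes : List String)
    (w : String) (hw : w ∈ classes)
    (hcover : ∀ o ∈ classes, o = w ∨ o ∈ chainDrop d m w)
    (huniq : ∀ e ∈ classes, (∀ o ∈ classes, o = e ∨ o ∈ chainDrop d m e) → e = w)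
    (hbig : ∀ e ∈ classes, ∃ x ∈ classes, x ≠ e) :
    ∀ lst, (∀ x ∈ lst, x ∈ classes) →
      lowLoopA d (m+1) classes lst = if w ∈ lst then some w else none := by
  intro lst
  induction lst with
  | nil => intro _; rfl
  | cons e rest ih =>
    intro hsub
    have he : e ∈ classes := hsub e (by simp)
    rw [lowLoopA]
    by_cases hcov : ∀ o ∈ classes, o = e ∨ o ∈ chainDrop d m e
    · have hew : e = w := huniq e he hcov
      rw [if_pos ((condA_iff d m e classes (hbig e he)).mpr hcov)]
      subst hew
      simp
    · rw [if_neg (fun hcond => hcov ((condA_iff d m e classes (hbig e he)).mp hcond))]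
      rw [ih (fun x hx => hsub x (List.mem_cons_of_mem _ hx))]
      have hew : w ≠ e := fun h => hcov (h ▸ hcover)
      simp [List.mem_cons, fun h : w = e => hew h]

-- ===== VERDICT (by name: the statement is the Claim_ definition above) =====
theorem low_class_spec : Claim_equal_low_class := by
  intro subClasses classes _ hpre
  show low_class subClasses classes = low_class_alt subClasses classes
  obtain ⟨hnd, hterm⟩ := hpre
  set d := PySem.Dict.ofList subClasses with hd
  set L := subClasses.length with hL
  simp only [low_class, low_class_alt, ← hd, ← hL]
  by_cases h1 : (classes.length == 1) = true
  · rw [if_pos h1, if_pos h1]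
  · rw [if_neg h1, if_neg h1]
    have hterm' : ∀ c ∈ classes, TermC d (L+1) c := hterm
    match hcl : classes, hnd, h1, hterm' with
    | [], _, _, _ => rfl
    | [a], _, h1, _ => simp at h1
    | c0 :: c1 :: rest, hnd, _, hterm' =>
      -- every class in a ≥2-element nodup list has a distinct companion
      have hbig : ∀ e ∈ c0 :: c1 :: rest, ∃ x ∈ c0 :: c1 :: rest, x ≠ e := by
        intro e he
        by_cases hc0 : c0 = e
        · refine ⟨c1, by simp, fun hb => ?_⟩
          have : c0 ∈ c1 :: rest := by rw [hc0, ← hb]; exact List.mem_cons_self ..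
          exact (List.nodup_cons.mp hnd).1 this
        · exact ⟨c0, by simp, hc0⟩
      set cls := c0 :: c1 :: rest with hcls
      -- B side: the loop starts by installing c0, then runs the argmax
      have hB : pickBest d L cls (none, []) =
          (some (argmH d L c0 (c1 :: rest)),
           chainWalkB d L (argmH d L c0 (c1 :: rest)) [argmH d L c0 (c1 :: rest)]) := by
        show pickBest d L (c1 :: rest) (some c0, chainWalkB d L c0 [c0]) = _
        exact pickBest_run d L (c1 :: rest) c0
      rw [hB]
      by_cases hex : ∃ w ∈ cls, ∀ o ∈ cls, o = w ∨ o ∈ chainDrop d L w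
      · obtain ⟨w, hwmem, hcover⟩ := hex
        -- dominance: every other class has a strictly shorter chain
        have hdom : ∀ x ∈ cls, x ≠ w →
            (chainWalkB d L x [x]).length < (chainWalkB d L w [w]).length := by
          intro x hx hxw
          have hxc : x ∈ chainDrop d L w := (hcover x hx).resolve_left hxw
          have := chainDrop_depth d L w x (hterm' w hwmem) hxc
          rw [chainWalkB_eq, chainWalkB_eq]
          simpa using this
        have huniq : ∀ e ∈ cls, (∀ o ∈ cls, o = e ∨ o ∈ chainDrop d L e) → e = w := by
          intro e he hcove
          by_contra hew
          have h1 := hdom e he hew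
          have hwc : w ∈ chainDrop d L e := (hcove w hwmem).resolve_left (fun h => hew h.symm)
          have h2 := chainDrop_depth d L e w (hterm' e he) hwc
          rw [chainWalkB_eq, chainWalkB_eq] at h1
          simp at h1
          omega
        have hargm : argmH d L c0 (c1 :: rest) = w := argmH_max d L w (c1 :: rest) c0 hwmem hdom
        rw [hargm, lowLoopA_some d L cls w hwmem hcover huniq hbig cls (fun x hx => hx),
            if_pos hwmem]
        show some w = if cls.all (fun o => PySem.Set.contains (PySem.Set.ofList (chainWalkB d L w [w])) o) then some w else none
        rw [(condB_iff d L w cls).mpr hcover]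
        rfl
      · rw [lowLoopA_none d L cls (fun e he hc => hex ⟨e, he, hc⟩) hbig cls (fun x hx => hx)]
        set b := argmH d L c0 (c1 :: rest) with hb
        have hbmem : b ∈ cls := argmH_mem d L (c1 :: rest) c0
        show (none : Option String) = if cls.all (fun o => PySem.Set.contains (PySem.Set.ofList (chainWalkB d L b [b])) o) then some b else none
        by_cases hc : (cls.all (fun o => PySem.Set.contains (PySem.Set.ofList (chainWalkB d L b [b])) o)) = true
        · exact absurd ⟨b, hbmem, (condB_iff d L b cls).mp hc⟩ hex
        · rw [Bool.not_eq_true] at hc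
          rw [hc]
          rfl
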